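-- pv_equiv track=rewrite | github.com/TPO-Code/PyTPO | TPOPyside/widgets/code_editor/code_folding.py | _normalize_fold_ranges
-- ===== SOURCE A (Python) =====
-- def _normalize_fold_ranges(ranges: list[tuple[int, int]], line_count: int) -> list[tuple[int, int]]:
--     merged: dict[int, int] = {}
--     max_line = max(0, int(line_count))
--     for start_raw, end_raw in ranges:
--         try:
--             start = int(start_raw)
--             end = int(end_raw)
--         except Exception:
--             continue
--         if start < 1:
--             start = 1
--         if end > max_line:
--             end = max_line
--         if end <= start:
--             continue
--         prev = merged.get(start)
--         if prev is None or end > prev: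
--             merged[start] = end
--     return sorted(merged.items(), key=lambda item: (item[0], item[1]))
-- ===== SOURCE B (Python) =====
-- def _normalize_fold_ranges(ranges: list[tuple[int, int]], line_count: int) -> list[tuple[int, int]]:
--     max_line = max(0, int(line_count))
--     kept = []
--     for start_raw, end_raw in ranges:
--         start = max(int(start_raw), 1)
--         end = min(int(end_raw), max_line)
--         if end > start:
--             kept.append((start, end))
--     kept.sort()
--     out = []
--     for i, pair in enumerate(kept):
--         # keep only the last pair of each run of equal starts: sorted order
--         # guarantees that pair carries the largest end for its start
--         if i + 1 == len(kept) or kept[i + 1][0] != pair[0]: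
--             out.append(pair)
--     return out
-- ===== Notes on version B (the rewrite author's own statement) =====
-- stated objective: alternative
-- what changed: B drops A's dict that dedups starts while scanning: it clamps surviving ranges into a plain list, sorts it once lexicographically, and a single grouping pass over the sorted list keeps the last (largest-end) pair of each run of equal starts, producing the final sorted result directly.
import Mathlib
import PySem

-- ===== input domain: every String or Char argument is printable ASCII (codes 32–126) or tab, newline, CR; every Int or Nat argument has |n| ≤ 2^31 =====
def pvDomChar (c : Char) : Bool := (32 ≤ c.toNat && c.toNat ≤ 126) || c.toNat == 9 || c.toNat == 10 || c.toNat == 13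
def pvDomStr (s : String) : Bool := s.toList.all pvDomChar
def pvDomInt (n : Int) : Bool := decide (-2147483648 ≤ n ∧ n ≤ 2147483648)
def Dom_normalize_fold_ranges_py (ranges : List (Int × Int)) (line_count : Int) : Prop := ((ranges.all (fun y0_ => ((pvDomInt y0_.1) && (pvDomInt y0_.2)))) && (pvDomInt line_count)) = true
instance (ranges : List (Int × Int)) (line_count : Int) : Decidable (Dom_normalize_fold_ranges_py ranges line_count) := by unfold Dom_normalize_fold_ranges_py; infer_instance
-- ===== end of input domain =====

-- B replaces A's dict-dedup-then-sort by clamp-to-list, one sort, and a single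
-- grouping pass over the sorted list (alternative decomposition, same cost class).

-- ===== PORT A =====
-- literal port of _normalize_fold_ranges; int() on int arguments is the
-- identity, so the try/except can never fire on inputs of this type
def normalize_fold_ranges_py (ranges : List (Int × Int)) (line_count : Int) : List (Int × Int) :=
  let max_line : Int := max 0 line_count
  let merged : PySem.Dict Int Int :=
    ranges.foldl (fun merged pr =>
      let start := pr.1
      let e := pr.2
      let start := if start < 1 then 1 else start
      let e := if e > max_line then max_line else e
      if e ≤ start then merged
      else
        match merged.get? start with
        | none => merged.insert start e
        | some prev => if e > prev then merged.insert start e else merged)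
      PySem.Dict.empty
  PySem.List.sorted2 merged.items Prod.fst Prod.snd

-- ===== PORT B =====
-- the grouping loop of Source B: keep a pair iff the next pair has a different start
def pvGroupLast : List (Int × Int) → List (Int × Int)
  | [] => []
  | [p] => [p]
  | p :: q :: t => if q.1 = p.1 then pvGroupLast (q :: t) else p :: pvGroupLast (q :: t)

def normalize_fold_ranges_py_alt (ranges : List (Int × Int)) (line_count : Int) : List (Int × Int) :=
  let max_line : Int := max 0 line_count
  let kept : List (Int × Int) :=
    ranges.foldl (fun kept pr =>
      let start := max pr.1 1
      let e := min pr.2 max_line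
      if e > start then kept ++ [(start, e)] else kept) []
  pvGroupLast (PySem.List.sorted2 kept Prod.fst Prod.snd)

-- ===== PRECONDITION & SPEC =====
def Spec_normalize_fold_ranges_py (ranges : List (Int × Int)) (line_count : Int) (out : List (Int × Int)) : Prop := out = normalize_fold_ranges_py_alt ranges line_count
instance (ranges : List (Int × Int)) (line_count : Int) (out : List (Int × Int)) : Decidable (Spec_normalize_fold_ranges_py ranges line_count out) := by unfold Spec_normalize_fold_ranges_py; infer_instance

-- ===== CLAIM (what is proved, stated in full; the proofs are below) =====
def Claim_equal_normalize_fold_ranges_py : Prop := ∀ (ranges : List (Int × Int)) (line_count : Int), Dom_normalize_fold_ranges_py ranges line_count → Spec_normalize_fold_ranges_py ranges line_count (normalize_fold_ranges_py ranges line_count)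

-- ===== LEMMAS AND PROOFS =====

-- lexicographic comparison on pairs (Python's tuple order)
def pvLexLe (a b : Int × Int) : Prop := (toLex a : Int ×ₗ Int) ≤ toLex b
def pvLtB (a b : Int × Int) : Bool := decide ((toLex a : Int ×ₗ Int) < toLex b)

-- the ends of the kept pairs whose start is s, in order
def pvEnds (s : Int) (L : List (Int × Int)) : List Int :=
  (L.filter (fun pr => decide (pr.1 = s))).map Prod.snd

-- A's "keep the larger end" update, folded over a list of ends
def pvStep (o : Option Int) (v : Int) : Option Int :=
  some (match o with | none => v | some a => if v > a then v else a)
def pvMax? (l : List Int) : Option Int := l.foldl pvStep none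

-- the canonical pair produced for start s
def pvVal (L : List (Int × Int)) (s : Int) : Int × Int := (s, (pvMax? (pvEnds s L)).getD 0)

-- A's dict-update step, on an already clamped pair
def pvDStep (m : PySem.Dict Int Int) (pr : Int × Int) : PySem.Dict Int Int :=
  match m.get? pr.1 with
  | none => m.insert pr.1 pr.2
  | some prev => if pr.2 > prev then m.insert pr.1 pr.2 else m

-- ----- pvMax? : the running "keep the larger end" loop computes the maximum -----

theorem pvMax?_from_some (l : List Int) (a : Int) : l.foldl pvStep (some a) = some (l.foldl max a) := by
  induction l generalizing a with
  | nil => rfl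
  | cons v t ih =>
    simp only [List.foldl_cons]
    rw [show pvStep (some a) v = some (max a v) by simp [pvStep]; omega, ih]

theorem pvMax?_cons (v : Int) (t : List Int) : pvMax? (v :: t) = some (t.foldl max v) := by
  simp only [pvMax?, List.foldl_cons, pvStep]
  exact pvMax?_from_some t v

theorem pvMax?_spec (l : List Int) (e : Int) : pvMax? l = some e ↔ e ∈ l ∧ ∀ x ∈ l, x ≤ e := by
  cases l with
  | nil => simp [pvMax?]
  | cons v t =>
    rw [pvMax?_cons]
    constructor
    · rintro h
      injection h with h; subst h
      refine ⟨?_, ?_⟩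
      · rcases PySem.List.foldl_max_mem t v with h | h
        · rw [h]; exact List.mem_cons_self
        · exact List.mem_cons_of_mem _ h
      · intro x hx
        rcases List.mem_cons.mp hx with rfl | hx
        · exact (PySem.List.le_foldl_max t x).1
        · exact (PySem.List.le_foldl_max t v).2 x hx
    · rintro ⟨hmem, hub⟩
      have h1 : t.foldl max v ≤ e := by
        rcases PySem.List.foldl_max_mem t v with h | h
        · rw [h]; exact hub v List.mem_cons_self
        · exact hub _ (List.mem_cons_of_mem _ h)
      have h2 : e ≤ t.foldl max v := by
        rcases List.mem_cons.mp hmem with rfl | hx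
        · exact (PySem.List.le_foldl_max t e).1
        · exact (PySem.List.le_foldl_max t v).2 e hx
      exact congrArg some (le_antisymm h1 h2)

theorem pvMax?_perm {l l' : List Int} (h : l.Perm l') : pvMax? l = pvMax? l' := by
  cases hl : pvMax? l' with
  | none =>
    have : l' = [] := by
      cases l' with
      | nil => rfl
      | cons v t => rw [pvMax?_cons] at hl; cases hl
    subst this
    simp [List.Perm.eq_nil h, pvMax?]
  | some e =>
    rw [pvMax?_spec] at hl ⊢
    exact ⟨h.mem_iff.mpr hl.1, fun x hx => hl.2 x (h.mem_iff.mp hx)⟩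

theorem pvMax?_cons_absorb {v w : Int} {l : List Int} (hvw : v ≤ w) (hw : w ∈ l) :
    pvMax? (v :: l) = pvMax? l := by
  cases hl : pvMax? l with
  | none =>
    exfalso
    cases l with
    | nil => cases hw
    | cons a t => rw [pvMax?_cons] at hl; cases hl
  | some e =>
    rw [pvMax?_spec] at hl
    rw [pvMax?_spec]
    refine ⟨List.mem_cons_of_mem _ hl.1, ?_⟩
    intro x hx
    rcases List.mem_cons.mp hx with rfl | hx
    · exact le_trans hvw (hl.2 w hw)
    · exact hl.2 x hx

-- ----- sorted2 with keys fst, snd is sorting by the lexicographic pair order -----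

theorem sorted2_foldl (xs : List (Int × Int)) :
    PySem.List.sorted2 xs Prod.fst Prod.snd =
      xs.foldl (fun acc x => PySem.List.insertBy pvLtB x acc) [] := by
  have hfun : (fun (a b : Int × Int) => (decide (a.1 < b.1) || (!decide (b.1 < a.1) && decide (a.2 < b.2)))) = pvLtB := by
    funext a b
    rcases a with ⟨a1, a2⟩
    rcases b with ⟨b1, b2⟩
    simp only [pvLtB, Prod.Lex.lt_iff, ofLex_toLex]
    rw [Bool.eq_iff_iff]
    simp only [Bool.or_eq_true, Bool.and_eq_true, Bool.not_eq_true', decide_eq_true_iff, decide_eq_false_iff_not]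
    constructor <;> intro h <;> omega
  simp only [PySem.List.sorted2]
  simp only [if_neg (by decide : ¬ (false = true))]
  rw [hfun]

theorem sorted2_pairwise_lex (xs : List (Int × Int)) :
    (PySem.List.sorted2 xs Prod.fst Prod.snd).Pairwise pvLexLe := by
  rw [sorted2_foldl]
  have aux : ∀ (ys : List (Int × Int)) (acc : List (Int × Int)),
      acc.Pairwise (fun a b => (toLex a : Int ×ₗ Int) ≤ toLex b) →
      (ys.foldl (fun acc x => PySem.List.insertBy pvLtB x acc) acc).Pairwise
        (fun a b => (toLex a : Int ×ₗ Int) ≤ toLex b) := by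
    intro ys
    induction ys with
    | nil => intro acc h; exact h
    | cons y t ih =>
      intro acc h
      simp only [List.foldl_cons]
      exact ih _ (PySem.List.insertBy_pairwise_le (toLex : Int × Int → Int ×ₗ Int) y acc h)
  exact aux xs [] List.Pairwise.nil

theorem sorted2_eq_of_perm_of_pairwise_lexle (xs ys : List (Int × Int))
    (hp : ys.Perm xs) (hs : ys.Pairwise pvLexLe) :
    PySem.List.sorted2 xs Prod.fst Prod.snd = ys := by
  have hperm : (PySem.List.sorted2 xs Prod.fst Prod.snd).Perm ys :=
    (PySem.List.sorted2_perm xs Prod.fst Prod.snd false).trans hp.symm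
  exact PySem.List.eq_of_perm_of_pairwise_le_of_injective
    (toLex : Int × Int → Int ×ₗ Int) (toLex.injective) hperm
    (sorted2_pairwise_lex xs) hs

-- ----- structural facts about PySem.Set.ofList -----

theorem foldl_add_cons {x : Int} {xs : List Int} (hx : x ∉ xs) (s : List Int) :
    xs.foldl PySem.Set.add (x :: s) = x :: xs.foldl PySem.Set.add s := by
  induction xs generalizing s with
  | nil => rfl
  | cons y t ih =>
    have hxy : y ≠ x := fun h => hx (by simp [h])
    have hxt : x ∉ t := fun h => hx (List.mem_cons_of_mem _ h)
    simp only [List.foldl_cons]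
    rw [show PySem.Set.add (x :: s) y = x :: PySem.Set.add s y by
      have hc : PySem.Set.contains (x :: s) y = PySem.Set.contains s y := by
        simp [PySem.Set.contains, hxy]
      simp only [PySem.Set.add, hc]
      split <;> simp]
    exact ih hxt _

theorem ofList_cons_not_mem {x : Int} {xs : List Int} (hx : x ∉ xs) :
    PySem.Set.ofList (x :: xs) = x :: PySem.Set.ofList xs := by
  simp only [PySem.Set.ofList, List.foldl_cons]
  have h0 : PySem.Set.add PySem.Set.empty x = [x] := rfl
  rw [h0]
  exact foldl_add_cons hx []

theorem ofList_cons_cons_self (x : Int) (l : List Int) :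
    PySem.Set.ofList (x :: x :: l) = PySem.Set.ofList (x :: l) := by
  simp only [PySem.Set.ofList, List.foldl_cons]
  congr 1
  show PySem.Set.add (PySem.Set.add PySem.Set.empty x) x = PySem.Set.add PySem.Set.empty x
  simp [PySem.Set.add, PySem.Set.empty, PySem.Set.contains]

theorem foldl_add_sublist (xs : List Int) : ∀ (s : List Int),
    ∃ t, xs.foldl PySem.Set.add s = s ++ t ∧ t.Sublist xs := by
  induction xs with
  | nil => intro s; exact ⟨[], by simp⟩
  | cons y ys ih =>
    intro s
    simp only [List.foldl_cons]
    by_cases hc : PySem.Set.contains s y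
    · obtain ⟨t, ht, hsub⟩ := ih s
      refine ⟨t, ?_, hsub.cons _⟩
      rw [show PySem.Set.add s y = s from by simp only [PySem.Set.add]; rw [if_pos hc]]
      exact ht
    · obtain ⟨t, ht, hsub⟩ := ih (s ++ [y])
      refine ⟨y :: t, ?_, hsub.cons₂ _⟩
      rw [show PySem.Set.add s y = s ++ [y] from by simp only [PySem.Set.add]; rw [if_neg (by exact fun h => hc h)]]
      rw [ht, List.append_assoc]
      rfl

theorem ofList_sublist (xs : List Int) : (PySem.Set.ofList xs).Sublist xs := by
  obtain ⟨t, ht, hsub⟩ := foldl_add_sublist xs []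
  simpa [PySem.Set.ofList, PySem.Set.empty, ht] using hsub

theorem ofList_perm_of_perm {xs ys : List Int} (h : xs.Perm ys) :
    (PySem.Set.ofList xs).Perm (PySem.Set.ofList ys) := by
  rw [List.perm_ext_iff_of_nodup (PySem.Set.nodup_ofList xs) (PySem.Set.nodup_ofList ys)]
  intro a
  rw [PySem.Set.mem_ofList, PySem.Set.mem_ofList]
  exact h.mem_iff

-- ----- the dict built by A's loop: lookups and keys -----

theorem get?_pvDStep (m : PySem.Dict Int Int) (pr : Int × Int) (s : Int) :
    (pvDStep m pr).get? s =
      if pr.1 = s then pvStep (m.get? s) pr.2 else m.get? s := by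
  by_cases hs : pr.1 = s
  · subst hs
    unfold pvDStep
    cases hm : m.get? pr.1 with
    | none => simp [PySem.Dict.get?_insert_self, pvStep]
    | some prev =>
      by_cases hgt : pr.2 > prev
      · simp [hgt, PySem.Dict.get?_insert_self, pvStep]
      · simp [hgt, pvStep, hm]
        try omega
  · unfold pvDStep
    cases hm : m.get? pr.1 with
    | none => rw [PySem.Dict.get?_insert_of_ne m pr.2 (fun h => hs (Eq.symm h)), if_neg hs]
    | some prev =>
      by_cases hgt : pr.2 > prev
      · simp only []
        rw [if_pos hgt, PySem.Dict.get?_insert_of_ne m pr.2 (fun h => hs (Eq.symm h)), if_neg hs]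
      · simp only []
        rw [if_neg hgt, if_neg hs]

theorem get?_foldl_pvDStep (K : List (Int × Int)) : ∀ (m : PySem.Dict Int Int) (s : Int),
    (K.foldl pvDStep m).get? s =
      K.foldl (fun o pr => if pr.1 = s then pvStep o pr.2 else o) (m.get? s) := by
  induction K with
  | nil => intro m s; rfl
  | cons p t ih =>
    intro m s
    simp only [List.foldl_cons]
    rw [ih, get?_pvDStep]

theorem get?_final (K : List (Int × Int)) (s : Int) :
    (K.foldl pvDStep PySem.Dict.empty).get? s = pvMax? (pvEnds s K) := by
  rw [get?_foldl_pvDStep]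
  rw [PySem.Dict.get?_empty]
  rw [PySem.List.foldl_ite_eq_foldl_filter (fun pr : Int × Int => pr.1 = s)
    (fun o pr => pvStep o pr.2) K none]
  rw [pvEnds, pvMax?, List.foldl_map]

theorem keys_pvDStep (m : PySem.Dict Int Int) (pr : Int × Int) :
    (pvDStep m pr).keys = PySem.Set.add m.keys pr.1 := by
  unfold pvDStep
  cases hm : m.get? pr.1 with
  | none =>
    have hc : m.contains pr.1 = false := by
      rw [PySem.Dict.contains_eq_isSome_get?, hm]; rfl
    rw [PySem.Dict.keys_insert_of_not_contains m pr.2 hc]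
    have : PySem.Set.contains m.keys pr.1 = false := by
      rw [show PySem.Set.contains m.keys pr.1 = m.contains pr.1 from ?_, hc]
      rw [PySem.Dict.contains_eq_decide_mem_keys]
      simp [PySem.Set.contains]
    have hnm : pr.1 ∉ m.keys := by
      simpa [PySem.Set.contains, List.contains_iff_mem] using this
    simp [PySem.Set.add, PySem.Set.contains, hnm]
  | some prev =>
    have hc : m.contains pr.1 = true := by
      rw [PySem.Dict.contains_eq_isSome_get?, hm]; rfl
    have hmem : pr.1 ∈ m.keys := by
      rw [PySem.Dict.contains_eq_decide_mem_keys] at hc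
      simpa using hc
    by_cases hgt : pr.2 > prev
    · simp only []
      rw [if_pos hgt, PySem.Dict.keys_insert_of_contains m pr.2 hc]
      simp [PySem.Set.add, PySem.Set.contains, hmem]
    · simp only []
      rw [if_neg hgt]
      simp [PySem.Set.add, PySem.Set.contains, hmem]

theorem keys_final (K : List (Int × Int)) :
    (K.foldl pvDStep PySem.Dict.empty).keys = PySem.Set.ofList (K.map Prod.fst) := by
  have aux : ∀ (m : PySem.Dict Int Int),
      (K.foldl pvDStep m).keys = (K.map Prod.fst).foldl PySem.Set.add m.keys := by
    induction K with
    | nil => intro m; rfl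
    | cons p t ih =>
      intro m
      simp only [List.foldl_cons, List.map_cons]
      rw [ih, keys_pvDStep]
  rw [aux, PySem.Set.ofList]
  rfl

-- ----- the grouping pass on a lex-sorted list -----

theorem pvEnds_cons (s : Int) (p : Int × Int) (L : List (Int × Int)) :
    pvEnds s (p :: L) = if p.1 = s then p.2 :: pvEnds s L else pvEnds s L := by
  simp only [pvEnds, List.filter_cons]
  by_cases h : p.1 = s
  · simp [h]
  · simp [h]

theorem pvEnds_eq_nil_of_not_mem {s : Int} {L : List (Int × Int)} (h : s ∉ L.map Prod.fst) :
    pvEnds s L = [] := by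
  simp only [pvEnds, List.map_eq_nil_iff, List.filter_eq_nil_iff]
  intro pr hpr
  simp only [decide_eq_true_eq]
  intro he
  exact h (List.mem_map.mpr ⟨pr, hpr, he⟩)

theorem pvLexLe_fst {a b : Int × Int} (h : pvLexLe a b) : a.1 ≤ b.1 := by
  have h' : a.1 < b.1 ∨ (a.1 = b.1 ∧ a.2 ≤ b.2) := by
    simpa using (Prod.Lex.le_iff).mp h
  rcases h' with h1 | ⟨h1, _⟩
  · exact le_of_lt h1
  · exact le_of_eq h1

theorem pvGroupLast_eq (L : List (Int × Int)) (h : L.Pairwise pvLexLe) :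
    pvGroupLast L = (PySem.Set.ofList (L.map Prod.fst)).map (pvVal L) := by
  induction L with
  | nil => rfl
  | cons p L ih =>
    cases L with
    | nil =>
      show [p] = (PySem.Set.ofList [p.1]).map (pvVal [p])
      have : PySem.Set.ofList [p.1] = [p.1] := rfl
      rw [this]
      simp [pvVal, pvEnds, pvMax?, pvStep]
    | cons q t =>
      rw [List.pairwise_cons] at h
      obtain ⟨hp, hq⟩ := h
      have hpq : pvLexLe p q := hp q List.mem_cons_self
      have ihe := ih hq
      show (if q.1 = p.1 then pvGroupLast (q :: t) else p :: pvGroupLast (q :: t))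
        = (PySem.Set.ofList ((p :: q :: t).map Prod.fst)).map (pvVal (p :: q :: t))
      by_cases heq : q.1 = p.1
      · rw [if_pos heq]
        have hset : PySem.Set.ofList ((p :: q :: t).map Prod.fst)
            = PySem.Set.ofList ((q :: t).map Prod.fst) := by
          simp only [List.map_cons]
          rw [← heq, ofList_cons_cons_self]
        rw [hset, ihe]
        apply List.map_congr_left
        intro s hs
        have hsmem : s ∈ (q :: t).map Prod.fst := (PySem.Set.mem_ofList _ s).mp hs
        symm
        unfold pvVal
        rw [pvEnds_cons]
        by_cases hps : p.1 = s
        · rw [if_pos hps]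
          -- s = p.1 = q.1 : the tail's ends start with q.2 ≥ p.2
          have hq2 : q.2 ∈ pvEnds s (q :: t) := by
            rw [pvEnds_cons, if_pos (heq.trans hps)]
            exact List.mem_cons_self
          have hle : p.2 ≤ q.2 := by
            have hpq' : p.1 < q.1 ∨ (p.1 = q.1 ∧ p.2 ≤ q.2) := by
              simpa using (Prod.Lex.le_iff).mp hpq
            rcases hpq' with h1 | ⟨_, h2⟩
            · exfalso; omega
            · exact h2
          rw [pvMax?_cons_absorb hle hq2]
        · rw [if_neg hps]
      · rw [if_neg heq]
        have hlt : p.1 < q.1 := by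
          have hpq' : p.1 < q.1 ∨ (p.1 = q.1 ∧ p.2 ≤ q.2) := by
            simpa using (Prod.Lex.le_iff).mp hpq
          rcases hpq' with h1 | ⟨h1, _⟩
          · exact h1
          · exact absurd h1.symm heq
        have hnotmem : p.1 ∉ (q :: t).map Prod.fst := by
          intro hmem
          rcases List.mem_map.mp hmem with ⟨x, hx, hfx⟩
          rcases List.mem_cons.mp hx with rfl | hxt
          · omega
          · have hqx : q.1 ≤ x.1 := pvLexLe_fst ((List.pairwise_cons.mp hq).1 x hxt)
            omega
        have hset : PySem.Set.ofList ((p :: q :: t).map Prod.fst)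
            = p.1 :: PySem.Set.ofList ((q :: t).map Prod.fst) := by
          simp only [List.map_cons]
          exact ofList_cons_not_mem (by simpa using hnotmem)
        rw [hset, List.map_cons, ihe]
        congr 1
        · -- head: pvVal (p :: q :: t) p.1 = p
          symm
          unfold pvVal
          rw [pvEnds_cons, if_pos rfl, pvEnds_eq_nil_of_not_mem hnotmem]
          simp [pvMax?, pvStep]
        · apply List.map_congr_left
          intro s hs
          have hsmem : s ∈ (q :: t).map Prod.fst := (PySem.Set.mem_ofList _ s).mp hs
          have hps : p.1 ≠ s := fun hh => hnotmem (hh ▸ hsmem)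
          symm
          unfold pvVal
          rw [pvEnds_cons, if_neg hps]

-- ----- A's loop over raw ranges is the dict loop over the clamped kept pairs -----

theorem foldA_eq (ml : Int) (rs : List (Int × Int)) : ∀ (m : PySem.Dict Int Int),
    rs.foldl (fun merged pr =>
        let start := pr.1
        let e := pr.2
        let start := if start < 1 then 1 else start
        let e := if e > ml then ml else e
        if e ≤ start then merged
        else
          match merged.get? start with
          | none => merged.insert start e
          | some prev => if e > prev then merged.insert start e else merged) m
      = ((rs.filter (fun pr => decide (min pr.2 ml > max pr.1 1))).map
          (fun pr => (max pr.1 1, min pr.2 ml))).foldl pvDStep m := by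
  induction rs with
  | nil => intro m; rfl
  | cons p t ih =>
    intro m
    have hstart : (if p.1 < 1 then (1 : Int) else p.1) = max p.1 1 := by split <;> omega
    have hend : (if p.2 > ml then ml else p.2) = min p.2 ml := by split <;> omega
    simp only [List.foldl_cons, List.filter_cons]
    by_cases hP : min p.2 ml > max p.1 1
    · have hd : decide (min p.2 ml > max p.1 1) = true := by simpa using hP
      rw [if_pos hd]
      simp only [List.map_cons, List.foldl_cons]
      rw [← ih]
      congr 1
      show (let start := p.1
            let e := p.2
            let start := if start < 1 then 1 else start
            let e := if e > ml then ml else e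
            if e ≤ start then m
            else
              match m.get? start with
              | none => m.insert start e
              | some prev => if e > prev then m.insert start e else m)
        = pvDStep m (max p.1 1, min p.2 ml)
      simp only [hstart, hend]
      rw [if_neg (by omega)]
      rfl
    · rw [if_neg (show ¬ (decide (min p.2 ml > max p.1 1) = true) from by simpa using hP)]
      rw [← ih]
      congr 1
      show (let start := p.1
            let e := p.2
            let start := if start < 1 then 1 else start
            let e := if e > ml then ml else e
            if e ≤ start then m
            else
              match m.get? start with
              | none => m.insert start e
              | some prev => if e > prev then m.insert start e else m)
        = m
      simp only [hstart, hend]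
      rw [if_pos (by omega)]

-- ===== VERDICT (by name: the statement is the Claim_ definition above) =====
theorem normalize_fold_ranges_py_spec : Claim_equal_normalize_fold_ranges_py := by
  unfold Claim_equal_normalize_fold_ranges_py
  intro ranges line_count _
  unfold Spec_normalize_fold_ranges_py
  unfold normalize_fold_ranges_py normalize_fold_ranges_py_alt
  set ml : Int := max 0 line_count with hml
  -- the clamped kept pairs
  set KF : List (Int × Int) :=
    (ranges.filter (fun pr => decide (min pr.2 ml > max pr.1 1))).map
      (fun pr => (max pr.1 1, min pr.2 ml)) with hKF
  -- B's kept list is KF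
  have hkept : ranges.foldl (fun kept pr =>
      let start := max pr.1 1
      let e := min pr.2 ml
      if e > start then kept ++ [(start, e)] else kept) [] = KF := by
    simp only []
    rw [PySem.List.foldl_append_ite (fun pr : Int × Int => min pr.2 ml > max pr.1 1)
      (fun pr => (max pr.1 1, min pr.2 ml)) ranges []]
    simp [hKF]
  -- A's dict is the dict loop over KF
  have hdict := foldA_eq ml ranges PySem.Dict.empty
  simp only [hkept, hdict, ← hKF]
  set D : PySem.Dict Int Int := KF.foldl pvDStep PySem.Dict.empty with hD
  have hkeys : D.keys = PySem.Set.ofList (KF.map Prod.fst) := keys_final KF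
  have hnodup : D.keys.Nodup := by rw [hkeys]; exact PySem.Set.nodup_ofList _
  -- the dict's items are the canonical pairs over the distinct starts
  have hitems : D.items = (PySem.Set.ofList (KF.map Prod.fst)).map (pvVal KF) := by
    rw [PySem.Dict.items_eq_map_keys D hnodup 0, hkeys]
    apply List.map_congr_left
    intro k _
    unfold pvVal
    rw [show D.getD k 0 = (D.get? k).getD 0 from rfl, hD, get?_final]
  -- names for the two orderings of the distinct starts
  set SL : List (Int × Int) := PySem.List.sorted2 KF Prod.fst Prod.snd with hSL
  have hSLperm : SL.Perm KF := PySem.List.sorted2_perm KF Prod.fst Prod.snd false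
  have hSLpair : SL.Pairwise pvLexLe := sorted2_pairwise_lex KF
  -- the distinct starts of SL, in order, are the sorted distinct starts of KF
  have hsetperm : (PySem.Set.ofList (SL.map Prod.fst)).Perm (PySem.Set.ofList (KF.map Prod.fst)) :=
    ofList_perm_of_perm (hSLperm.map Prod.fst)
  have hsetlt : (PySem.Set.ofList (SL.map Prod.fst)).Pairwise (· < ·) := by
    have hle : (SL.map Prod.fst).Pairwise (· ≤ ·) := hSLpair.map _ (fun _ _ h => pvLexLe_fst h)
    have hle' : (PySem.Set.ofList (SL.map Prod.fst)).Pairwise (· ≤ ·) :=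
      hle.sublist (ofList_sublist _)
    have hnd : (PySem.Set.ofList (SL.map Prod.fst)).Nodup := PySem.Set.nodup_ofList _
    have := hle'.and hnd
    exact this.imp (fun ⟨h1, h2⟩ => lt_of_le_of_ne h1 h2)
  have hsorted : PySem.List.sorted (PySem.Set.ofList (KF.map Prod.fst)) (fun x => x)
      = PySem.Set.ofList (SL.map Prod.fst) :=
    PySem.List.sorted_eq_of_perm_of_pairwise_lt _ _ _ hsetperm hsetlt
  -- the A side: sort the dict's items
  have hAside : PySem.List.sorted2 D.items Prod.fst Prod.snd
      = (PySem.Set.ofList (SL.map Prod.fst)).map (pvVal KF) := by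
    apply sorted2_eq_of_perm_of_pairwise_lexle
    · rw [hitems]
      exact hsetperm.map _
    · apply hsetlt.map
      intro a b hab
      unfold pvVal pvLexLe
      rw [Prod.Lex.le_iff]
      left
      simpa using hab
  -- the B side: group the sorted kept list
  have hBside : pvGroupLast SL = (PySem.Set.ofList (SL.map Prod.fst)).map (pvVal SL) :=
    pvGroupLast_eq SL hSLpair
  -- values agree: the ends of each start are a permutation
  have hvals : ∀ s, pvVal SL s = pvVal KF s := by
    intro s
    unfold pvVal pvEnds
    rw [pvMax?_perm ((hSLperm.filter _).map Prod.snd)]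
  rw [hAside, hBside]
  exact (List.map_congr_left (fun s _ => hvals s)).symm
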